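-- pv_equiv track=rewrite | github.com/jmcabandara/drbdmanage | drbdmanage/conf/conffile.py | _extend_line
-- ===== SOURCE A (Python) =====
-- def _extend_line(line):
--     rc   = False
--     lidx = 0
--     idx  = 0
--     midx = len(line) - 1
--     while idx != -1:
--         idx = line.find("\\", lidx)
--         if idx != -1:
--             if idx >= midx:
--                 rc = True
--                 break
--             else:
--                 lidx = idx + 2
--         if lidx > midx:
--             break
--     return rc
-- ===== SOURCE B (Python) =====
-- def _extend_line(line):
--     escaped = False
--     for ch in line:
--         if escaped:
--             escaped = False
--         elif ch == "\\":
--             escaped = True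
--     return escaped
-- ===== Notes on version B (the rewrite author's own statement) =====
-- stated objective: simpler
-- what changed: Replaced the find()-based index-jumping while loop (lidx/idx/midx bookkeeping) with a single character-by-character loop that toggles one boolean escape flag and returns it.
import Mathlib
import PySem

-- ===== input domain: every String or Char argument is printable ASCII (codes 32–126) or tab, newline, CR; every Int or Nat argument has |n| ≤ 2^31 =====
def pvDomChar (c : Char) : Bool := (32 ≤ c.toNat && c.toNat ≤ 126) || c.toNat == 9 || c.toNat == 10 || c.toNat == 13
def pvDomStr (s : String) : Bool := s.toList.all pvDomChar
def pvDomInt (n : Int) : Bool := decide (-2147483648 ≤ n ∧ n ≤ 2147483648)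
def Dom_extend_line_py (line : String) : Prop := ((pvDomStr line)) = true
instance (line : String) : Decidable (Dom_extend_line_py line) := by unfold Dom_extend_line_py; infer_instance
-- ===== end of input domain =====

-- B replaces A's find()-based index-jumping scan by a single escaped-flag toggle loop (objective: simpler).

-- ===== PORT A =====
-- the while loop of _extend_line: state is lidx (the next search start); midx = len(line)-1.
-- The 'if h : lidx ≤ line.length' guard only totalizes the recursion; on every reachable call lidx ≤ line.length.
def extendLineLoopA (line : List Char) (lidx : Nat) : Bool :=
  if h : lidx ≤ line.length then
    let idx := PySem.Chars.findFrom line ['\\'] (lidx : Int) none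
    if h1 : idx = -1 then false                                   -- loop condition idx != -1 fails, rc = False
    else if idx ≥ (line.length : Int) - 1 then true               -- idx >= midx: rc = True, break
    else if idx + 2 > (line.length : Int) - 1 then false          -- lidx > midx: break, rc = False
    else extendLineLoopA line (idx.toNat + 2)                     -- lidx = idx + 2, next iteration
  else false
termination_by line.length + 1 - lidx
decreasing_by
  have hs := (PySem.Chars.findFrom_natCast_spec line ['\\'] lidx h h1).1
  omega

def extend_line_py (line : String) : Bool :=
  extendLineLoopA line.toList 0

-- ===== PORT B =====
def extend_line_py_alt (line : String) : Bool :=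
  line.toList.foldl (fun escaped ch => if escaped then false else ch == '\\') false

-- ===== PRECONDITION & SPEC =====
def Spec_extend_line_py (line : String) (out : Bool) : Prop := out = extend_line_py_alt line
instance (line : String) (out : Bool) : Decidable (Spec_extend_line_py line out) := by unfold Spec_extend_line_py; infer_instance

-- ===== CLAIM (what is proved, stated in full; the proofs are below) =====
def Claim_equal_extend_line_py : Prop := ∀ (line : String), Dom_extend_line_py line → Spec_extend_line_py line (extend_line_py line)

-- ===== LEMMAS AND PROOFS =====

-- B's step function
def escStep (escaped : Bool) (ch : Char) : Bool := if escaped then false else ch == '\\'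

theorem escStep_eq : (fun escaped ch => if escaped then false else ch == '\\') = escStep := rfl

-- over a backslash-free list the flag stays false
theorem foldl_escStep_false {l : List Char} (h : '\\' ∉ l) :
    l.foldl escStep false = false := by
  induction l with
  | nil => rfl
  | cons c t ih =>
      simp only [List.mem_cons, not_or] at h
      have : escStep false c = false := by
        simp [escStep]; exact fun hc => (h.1 hc.symm).elim
      simp [List.foldl_cons, this, ih h.2]

-- drop n starts with the element at n
theorem drop_eq_val_cons {α : Type} (l : List α) (n : Nat) (v : α) (h : n < l.length)
    (hv : l[n] = v) : l.drop n = v :: l.drop (n + 1) := by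
  rw [List.drop_eq_getElem_cons h, hv]

-- main invariant: the loop from lidx computes B's fold over the remaining suffix
theorem loopA_eq_foldl (line : List Char) (lidx : Nat) (h : lidx ≤ line.length) :
    extendLineLoopA line lidx = (line.drop lidx).foldl escStep false := by
  rw [extendLineLoopA]
  simp only [dif_pos h]
  set idx := PySem.Chars.findFrom line ['\\'] (lidx : Int) none with hidx
  by_cases h1 : idx = -1
  · -- no backslash in the suffix
    simp only [dif_pos h1]
    have hno : ¬ ['\\'] <:+: line.drop lidx :=
      (PySem.Chars.findFrom_natCast_eq_neg_one_iff line ['\\'] lidx h).1 h1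
    have hmem : '\\' ∉ line.drop lidx := by
      intro hm
      obtain ⟨s, t, hst⟩ := List.mem_iff_append.1 hm
      exact hno ⟨s, t, by simp [hst]⟩
    exact (foldl_escStep_false hmem).symm
  · simp only [dif_neg h1]
    obtain ⟨hge, hpre, hmin⟩ := PySem.Chars.findFrom_natCast_spec line ['\\'] lidx h h1
    have h0 : 0 ≤ idx := le_trans (by exact_mod_cast Nat.zero_le lidx) hge
    obtain ⟨t, ht⟩ := hpre
    have hlen : idx.toNat < line.length := by
      have := congrArg List.length ht
      simp at this
      omega
    -- the suffix at idx starts with the backslash found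
    have hch : line.drop idx.toNat = '\\' :: line.drop (idx.toNat + 1) := by
      apply drop_eq_val_cons line idx.toNat '\\' hlen
      have h2 : (line.drop idx.toNat).head? = some '\\' := by rw [← ht]; rfl
      rw [List.head?_drop] at h2
      rw [List.getElem?_eq_getElem hlen] at h2
      exact Option.some_inj.mp h2
    -- no backslash strictly before idx (from lidx on)
    have hnol : '\\' ∉ (line.drop lidx).take (idx.toNat - lidx) := by
      intro hm
      obtain ⟨j, hj, hjv⟩ := List.getElem_of_mem hm
      have hjt : j < idx.toNat - lidx := by
        have := List.length_take_le (idx.toNat - lidx) (line.drop lidx)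
        omega
      have hjl : lidx + j < line.length := by omega
      rw [List.getElem_take] at hjv
      rw [List.getElem_drop] at hjv
      apply hmin (lidx + j) (by omega) (by omega)
      exact ⟨line.drop (lidx + j + 1), (drop_eq_val_cons line (lidx + j) '\\' hjl hjv).symm⟩
    -- decompose the suffix: backslash-free prefix ++ '\' :: rest
    have hdecomp : line.drop lidx =
        (line.drop lidx).take (idx.toNat - lidx) ++ '\\' :: line.drop (idx.toNat + 1) := by
      have h2 : (line.drop lidx).drop (idx.toNat - lidx) = line.drop idx.toNat := by
        rw [List.drop_drop]; congr 1; omega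
      conv_lhs => rw [← List.take_append_drop (idx.toNat - lidx) (line.drop lidx)]
      rw [h2, hch]
    have hfold : (line.drop lidx).foldl escStep false =
        ('\\' :: line.drop (idx.toNat + 1)).foldl escStep false := by
      rw [hdecomp, List.foldl_append, foldl_escStep_false hnol]
    by_cases h2 : idx ≥ (line.length : Int) - 1
    · -- backslash at the last position: suffix after it is empty
      simp only [if_pos h2]
      have hlast : idx.toNat + 1 = line.length := by omega
      rw [hfold]
      simp [escStep, hlast]
    · simp only [if_neg h2]
      by_cases h3 : idx + 2 > (line.length : Int) - 1
      · -- backslash at position len-2: exactly one char after it, which resets the flag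
        simp only [if_pos h3]
        obtain ⟨c, hc⟩ : ∃ c, line.drop (idx.toNat + 1) = [c] := by
          apply List.length_eq_one_iff.mp
          simp
          omega
        rw [hfold, hc]
        simp [escStep]
      · -- skip the pair and continue with lidx = idx + 2
        simp only [if_neg h3]
        have hle : idx.toNat + 2 ≤ line.length := by omega
        have hlt : idx.toNat + 1 < line.length := by omega
        rw [loopA_eq_foldl line (idx.toNat + 2) hle, hfold]
        obtain ⟨c, hc⟩ : ∃ c, line.drop (idx.toNat + 1) = c :: line.drop (idx.toNat + 2) :=
          ⟨_, drop_eq_val_cons line (idx.toNat + 1) _ hlt rfl⟩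
        rw [hc]
        simp [escStep]
termination_by line.length + 1 - lidx
decreasing_by
  omega

-- ===== VERDICT (by name: the statement is the Claim_ definition above) =====
theorem extend_line_py_spec : Claim_equal_extend_line_py := by
  intro line _
  unfold Spec_extend_line_py extend_line_py extend_line_py_alt
  rw [escStep_eq, extendLineLoopA.eq_def]
  rw [← extendLineLoopA.eq_def]
  rw [loopA_eq_foldl line.toList 0 (Nat.zero_le _)]
  simp
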